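-- pv_equiv track=rewrite | github.com/naszhu/multiplecue-responsebox | exp/convert_dat_to_csv.py | find_table_start
-- ===== SOURCE A (Python) =====
-- MIN_TAB_COLUMNS = 10
--
-- def find_table_start(lines: list[str], min_cols: int = MIN_TAB_COLUMNS) -> tuple[int, int]:
--     """Return (header_idx, n_cols) for the first tabular section."""
--     for i, line in enumerate(lines):
--         parts = line.rstrip("\n").split("\t")
--         if len(parts) < min_cols:
--             continue
--         for j in range(i + 1, len(lines)):
--             next_line = lines[j].strip()
--             if not next_line:
--                 continue
--             if len(lines[j].rstrip("\n").split("\t")) == len(parts):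
--                 return i, len(parts)
--             break
--     raise ValueError("Could not find a tabular header line in .dat file.")
-- ===== SOURCE B (Python) =====
-- MIN_TAB_COLUMNS = 10
--
--
-- def find_table_start(lines: list[str], min_cols: int = MIN_TAB_COLUMNS) -> tuple[int, int]:
--     """Return (header_idx, n_cols) for the first tabular section.
--
--     One backward pass records, for each index, the column count of the first
--     non-blank line after it; one forward pass then finds the first header.
--     """
--     n = len(lines)
--     cols = [len(line.rstrip("\n").split("\t")) for line in lines]
--     blank = [not line.strip() for line in lines]
--     next_cols = [None] * n
--     nxt = None
--     for i in range(n - 1, -1, -1):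
--         next_cols[i] = nxt
--         if not blank[i]:
--             nxt = cols[i]
--     for i in range(n):
--         if cols[i] >= min_cols and next_cols[i] == cols[i]:
--             return i, cols[i]
--     raise ValueError("Could not find a tabular header line in .dat file.")
-- ===== Notes on version B (the rewrite author's own statement) =====
-- stated objective: alternative
-- what changed: Replaces the nested candidate/next-line scan with a single backward pass recording each index's next non-blank column count plus one forward scan over those pairs.
import Mathlib
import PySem

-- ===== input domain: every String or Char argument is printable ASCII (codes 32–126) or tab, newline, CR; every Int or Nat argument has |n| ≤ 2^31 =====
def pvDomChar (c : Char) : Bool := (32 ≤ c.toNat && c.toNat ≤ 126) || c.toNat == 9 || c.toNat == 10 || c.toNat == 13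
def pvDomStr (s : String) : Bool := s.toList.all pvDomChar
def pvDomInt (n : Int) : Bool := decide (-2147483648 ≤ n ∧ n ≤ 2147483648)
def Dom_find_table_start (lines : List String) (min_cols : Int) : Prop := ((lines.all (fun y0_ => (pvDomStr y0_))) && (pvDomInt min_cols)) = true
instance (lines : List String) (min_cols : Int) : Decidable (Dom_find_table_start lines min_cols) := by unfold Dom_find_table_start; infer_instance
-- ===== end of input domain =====

-- B replaces A's nested candidate/next-line scan by one backward pass recording the next
-- non-blank line's column count and one forward scan (objective: simpler, same asymptotic cost).
-- Where Python A raises ValueError (no header found; excluded by Pre_) both ports return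
-- the sentinel (-1, -1).

-- shared string primitives (exact ports of the Python expressions)
-- line.rstrip("\n"): drop trailing '\n' characters (hand port; exact, the strip set is the single char '\n')
def pvRstripNl (cs : List Char) : List Char := (cs.reverse.dropWhile (· == '\n')).reverse
-- len(line.rstrip("\n").split("\t"))
def pvCols (l : String) : Nat := (PySem.Chars.splitOn (pvRstripNl l.toList) ['\t']).length
-- not line.strip()  (True iff the stripped string is empty)
def pvBlank (l : String) : Bool := PySem.Chars.strip l.toList == []

-- ===== PORT A =====
-- inner loop 'for j in range(i+1, len(lines))' over the suffix after the candidate: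
-- skip blank lines, return True (→ 'return i, len(parts)') on equal column count, else break
def pvInnerA (plen : Nat) : List String → Bool
  | [] => false
  | l :: rest => if pvBlank l then pvInnerA plen rest else pvCols l == plen

-- outer loop 'for i, line in enumerate(lines)'
def pvOuterA (min_cols : Int) (i : Nat) : List String → Int × Int
  | [] => (-1, -1)   -- Python raises ValueError here (outside Pre_)
  | l :: rest =>
      let plen := pvCols l
      if (plen : Int) < min_cols then pvOuterA min_cols (i + 1) rest
      else if pvInnerA plen rest then ((i : Int), (plen : Int))
      else pvOuterA min_cols (i + 1) rest

def find_table_start (lines : List String) (min_cols : Int) : Int × Int :=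
  pvOuterA min_cols 0 lines

-- ===== PORT B =====
-- backward pass 'for i in range(n-1, -1, -1)' over (cols[i], blank[i]) pairs:
-- returns (final nxt, next_cols list)
def pvNextColsB : List (Nat × Bool) → Option Nat × List (Option Nat)
  | [] => (none, [])
  | (c, b) :: rest =>
      let (nxt, tail) := pvNextColsB rest
      ((if b then nxt else some c), nxt :: tail)

-- forward pass 'for i in range(n)'
def pvScanB (min_cols : Int) (i : Nat) : List (Nat × Option Nat) → Int × Int
  | [] => (-1, -1)   -- Python raises ValueError here (outside Pre_)
  | (c, nc) :: rest =>
      if min_cols ≤ (c : Int) && nc == some c then ((i : Int), (c : Int))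
      else pvScanB min_cols (i + 1) rest

def find_table_start_alt (lines : List String) (min_cols : Int) : Int × Int :=
  let colsL := lines.map pvCols
  let blankL := lines.map pvBlank
  let nextL := (pvNextColsB (colsL.zip blankL)).2
  pvScanB min_cols 0 (colsL.zip nextL)

-- ===== PRECONDITION & SPEC =====
-- Pre_ excludes exactly the inputs on which Python A raises ValueError (no line with enough
-- columns is followed — across blank lines — by a non-blank line of equal column count).
def Pre_find_table_start (lines : List String) (min_cols : Int) : Prop :=
  ∃ i < lines.length, min_cols ≤ (pvCols (lines.getD i "") : Int) ∧
    ∃ j < lines.length, i < j ∧ pvBlank (lines.getD j "") = false ∧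
      pvCols (lines.getD j "") = pvCols (lines.getD i "") ∧
      ∀ k < j, i < k → pvBlank (lines.getD k "") = true
instance (lines : List String) (min_cols : Int) : Decidable (Pre_find_table_start lines min_cols) := by
  unfold Pre_find_table_start; infer_instance

def pvWitness_find_table_start : List String × Int :=
  (["a\tb\tc", "", "1\t2\t3"], 3)

def Spec_find_table_start (lines : List String) (min_cols : Int) (out : Int × Int) : Prop := out = find_table_start_alt lines min_cols
instance (lines : List String) (min_cols : Int) (out : Int × Int) : Decidable (Spec_find_table_start lines min_cols out) := by unfold Spec_find_table_start; infer_instance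

-- ===== CLAIM (what is proved, stated in full; the proofs are below) =====
def Claim_equal_find_table_start : Prop := ∀ (lines : List String) (min_cols : Int), Dom_find_table_start lines min_cols → Pre_find_table_start lines min_cols → Spec_find_table_start lines min_cols (find_table_start lines min_cols)

-- ===== LEMMAS AND PROOFS =====
-- specification function for the proof: column count of the first non-blank line of a suffix
def pvNC : List String → Option Nat
  | [] => none
  | l :: r => if pvBlank l then pvNC r else some (pvCols l)

theorem pvInnerA_eq (plen : Nat) (ls : List String) :
    pvInnerA plen ls = (pvNC ls == some plen) := by
  induction ls with
  | nil => simp [pvInnerA, pvNC]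
  | cons l rest ih =>
      simp only [pvInnerA, pvNC]
      by_cases h : pvBlank l = true <;> simp [h, ih]

theorem pvNextColsB_fst (ls : List String) :
    (pvNextColsB ((ls.map pvCols).zip (ls.map pvBlank))).1 = pvNC ls := by
  induction ls with
  | nil => simp [pvNextColsB, pvNC]
  | cons l rest ih =>
      simp only [List.map_cons, List.zip_cons_cons, pvNextColsB, pvNC, ih]

theorem pvMain (min_cols : Int) (ls : List String) (i : Nat) :
    pvOuterA min_cols i ls
      = pvScanB min_cols i
          ((ls.map pvCols).zip (pvNextColsB ((ls.map pvCols).zip (ls.map pvBlank))).2) := by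
  induction ls generalizing i with
  | nil => simp [pvOuterA, pvNextColsB, pvScanB]
  | cons l rest ih =>
      simp only [List.map_cons, List.zip_cons_cons, pvNextColsB, pvOuterA, pvScanB,
        pvNextColsB_fst, pvInnerA_eq]
      by_cases hlt : (pvCols l : Int) < min_cols
      · have : ¬ (min_cols ≤ (pvCols l : Int)) := by omega
        simp [hlt, this, ih]
      · have hle : min_cols ≤ (pvCols l : Int) := by omega
        by_cases hin : pvNC rest = some (pvCols l)
        · simp [hlt, hle, hin]
        · simp [hlt, hle, hin, ih]

-- ===== VERDICT (by name: the statement is the Claim_ definition above) =====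
theorem find_table_start_spec : Claim_equal_find_table_start := by
  intro lines min_cols _ _
  unfold Spec_find_table_start find_table_start find_table_start_alt
  exact pvMain min_cols lines 0
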